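-- pv_equiv track=rewrite | github.com/energinet-singularity/singupy | singupy/conversion.py | kv_to_letter
-- ===== SOURCE A (Python) =====
-- def kv_to_letter(kv: int) -> str:
--     """Converts voltage level to voltage letter representation.
--     Parameters
--     ----------
--     kv : int
--         Voltage level in kV.
--     Returns
--     -------
--     str
--         Voltage letter.
--     Example
--     -------
--         >>> convert_kv_to_letter(400)
--         C
--     """
--     try:
--         kv = int(kv)
--     except Exception:
--         raise ValueError(f'"{kv}" is {type(kv)}, and not a valid numerical value.') from None
--
--     ranges = {(380, 420): 'C',
--               (220, 380): 'D',
--               (110, 220): 'E',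
--               (60, 110): 'F',
--               (45, 60): 'G',
--               (30, 45): 'H',
--               (20, 30): 'J',
--               (10, 20): 'K',
--               (6, 10): 'L',
--               (1, 6): 'M'}
--
--     for (lower, upper) in ranges.keys():
--         if lower <= kv < upper:
--             return ranges[(lower, upper)]
--
--     if kv >= 420:
--         return 'B'
--     elif kv < 1:
--         return 'N'
--     else:
--         raise ValueError(f'The value "{kv}" does not match a valid voltage region.')
-- ===== SOURCE B (Python) =====
-- def kv_to_letter(kv: int) -> str:
--     """Binary search over sorted thresholds instead of a linear scan of ranges."""
--     kv = int(kv)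
--     thresholds = [1, 6, 10, 20, 30, 45, 60, 110, 220, 380, 420]
--     letters = ['N', 'M', 'L', 'K', 'J', 'H', 'G', 'F', 'E', 'D', 'C', 'B']
--     lo, hi = 0, len(thresholds)
--     while lo < hi:
--         mid = (lo + hi) // 2
--         if kv < thresholds[mid]:
--             hi = mid
--         else:
--             lo = mid + 1
--     return letters[lo]
-- ===== Notes on version B (the rewrite author's own statement) =====
-- stated objective: idiomatic
-- what changed: Replaces the linear scan over a dict of (lower,upper) ranges plus two fallthrough branches by a bisect_right-style binary search over a sorted threshold list indexing a parallel letter list.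
import Mathlib
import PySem

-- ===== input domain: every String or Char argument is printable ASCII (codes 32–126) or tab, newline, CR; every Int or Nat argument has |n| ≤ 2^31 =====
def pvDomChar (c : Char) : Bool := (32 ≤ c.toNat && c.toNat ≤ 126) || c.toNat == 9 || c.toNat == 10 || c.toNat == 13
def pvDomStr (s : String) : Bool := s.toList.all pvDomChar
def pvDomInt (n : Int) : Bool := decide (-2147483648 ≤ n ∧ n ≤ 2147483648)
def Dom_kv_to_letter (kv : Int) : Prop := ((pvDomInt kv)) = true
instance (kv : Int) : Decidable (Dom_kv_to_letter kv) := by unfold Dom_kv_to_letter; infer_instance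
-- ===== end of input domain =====

-- B replaces A's linear scan over a dict of ranges (plus fallthrough branches) by a
-- binary search over a sorted threshold list (idiomatic bisect_right); same values everywhere.

-- ===== PORT A =====
-- the dict of ranges, in A's insertion order
def pvRanges : List ((Int × Int) × String) :=
  [((380, 420), "C"), ((220, 380), "D"), ((110, 220), "E"), ((60, 110), "F"),
   ((45, 60), "G"), ((30, 45), "H"), ((20, 30), "J"), ((10, 20), "K"),
   ((6, 10), "L"), ((1, 6), "M")]

-- A's for-loop over ranges.keys(); on a match, ranges[(lower,upper)] is the letter just paired
-- with that key (keys are distinct), so we return it directly.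
def pvScan : List ((Int × Int) × String) → Int → Option String
  | [], _ => none
  | ((lower, upper), s) :: rest, kv =>
      if lower ≤ kv ∧ kv < upper then some s else pvScan rest kv

def kv_to_letter (kv : Int) : String :=
  -- int(kv) on an int is the identity and cannot raise
  match pvScan pvRanges kv with
  | some s => s
  | none =>
      if kv ≥ 420 then "B"
      else if kv < 1 then "N"
      else ""  -- Python raises ValueError here; unreachable for every Int (ranges cover [1,420))

-- ===== PORT B =====
def pvThresholds : List Int := [1, 6, 10, 20, 30, 45, 60, 110, 220, 380, 420]
def pvLetters : List String := ["N", "M", "L", "K", "J", "H", "G", "F", "E", "D", "C", "B"]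

-- Source B's while lo < hi loop (bisect_right); totalized with fuel = hi - lo (the loop
-- runs at most hi - lo iterations), structurally recursive so it evaluates by kernel reduction
def pvBisectFuel (kv : Int) (lo hi : Nat) : Nat → Nat
  | 0 => lo
  | fuel + 1 =>
    if lo < hi then
      let mid := (lo + hi) / 2
      if kv < pvThresholds.getD mid 0 then pvBisectFuel kv lo mid fuel
      else pvBisectFuel kv (mid + 1) hi fuel
    else lo

def pvBisect (kv : Int) (lo hi : Nat) : Nat := pvBisectFuel kv lo hi (hi - lo)

def kv_to_letter_alt (kv : Int) : String :=
  pvLetters.getD (pvBisect kv 0 pvThresholds.length) ""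

-- ===== PRECONDITION & SPEC =====
def Spec_kv_to_letter (kv : Int) (out : String) : Prop := out = kv_to_letter_alt kv
instance (kv : Int) (out : String) : Decidable (Spec_kv_to_letter kv out) := by unfold Spec_kv_to_letter; infer_instance

-- ===== CLAIM (what is proved, stated in full; the proofs are below) =====
def Claim_equal_kv_to_letter : Prop := ∀ (kv : Int), Dom_kv_to_letter kv → Spec_kv_to_letter kv (kv_to_letter kv)

-- ===== LEMMAS AND PROOFS =====
-- evaluation of pvBisectFuel, bottom-up over the concrete recursion tree
theorem pvE (kv : Int) (l f : Nat) : pvBisectFuel kv l l f = l := by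
  cases f <;> simp [pvBisectFuel]

theorem pvB_0_1 (kv : Int) (f : Nat) : pvBisectFuel kv 0 1 (f + 1) = if kv < 1 then 0 else 1 := by
  norm_num [pvBisectFuel, pvThresholds, pvE]

theorem pvB_3_4 (kv : Int) (f : Nat) : pvBisectFuel kv 3 4 (f + 1) = if kv < 20 then 3 else 4 := by
  norm_num [pvBisectFuel, pvThresholds, pvE]

theorem pvB_6_7 (kv : Int) (f : Nat) : pvBisectFuel kv 6 7 (f + 1) = if kv < 60 then 6 else 7 := by
  norm_num [pvBisectFuel, pvThresholds, pvE]

theorem pvB_9_10 (kv : Int) (f : Nat) : pvBisectFuel kv 9 10 (f + 1) = if kv < 380 then 9 else 10 := by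
  norm_num [pvBisectFuel, pvThresholds, pvE]

theorem pvB_0_11f (kv : Int) (f : Nat) : pvBisectFuel kv 0 11 (f + 4) =
    if kv < 45 then
      (if kv < 10 then (if kv < 6 then (if kv < 1 then 0 else 1) else 2)
       else (if kv < 30 then (if kv < 20 then 3 else 4) else 5))
    else
      (if kv < 220 then (if kv < 110 then (if kv < 60 then 6 else 7) else 8)
       else (if kv < 420 then (if kv < 380 then 9 else 10) else 11)) := by
  norm_num [pvBisectFuel, pvThresholds, pvE, pvB_0_1, pvB_3_4, pvB_6_7, pvB_9_10]

theorem pvB_0_11 (kv : Int) : pvBisect kv 0 11 =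
    if kv < 45 then
      (if kv < 10 then (if kv < 6 then (if kv < 1 then 0 else 1) else 2)
       else (if kv < 30 then (if kv < 20 then 3 else 4) else 5))
    else
      (if kv < 220 then (if kv < 110 then (if kv < 60 then 6 else 7) else 8)
       else (if kv < 420 then (if kv < 380 then 9 else 10) else 11)) := by
  rw [pvBisect, show (11 : Nat) - 0 = 7 + 4 from rfl, pvB_0_11f]

-- ===== VERDICT (by name: the statement is the Claim_ definition above) =====
set_option maxHeartbeats 2000000 in
theorem kv_to_letter_spec : Claim_equal_kv_to_letter := by
  intro kv _
  unfold Spec_kv_to_letter kv_to_letter kv_to_letter_alt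
  rw [show pvThresholds.length = 11 from rfl, pvB_0_11]
  simp only [pvScan, pvRanges]
  split_ifs <;> first | (exfalso; omega) | rfl
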